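-- pv_equiv track=rewrite | github.com/Park-Giryun/Algorithm-Programmers | Line_test/2.py | solution
-- ===== SOURCE A (Python) =====
-- from collections import Counter
-- from collections import Counter
--
-- def solution(research, n, k):
--     answer = []
--     temp = []
--     for re in research:
--         for key, v in Counter(re).items():
--             if v >= k:
--                 temp.append(key)
--     arr = Counter(temp).most_common()
--     answer += sorted(["".join(key) for key, v in arr if v >= n and v == arr[0][1]])
--     return answer[0]
-- ===== SOURCE B (Python) =====
-- def runs(xs):
--     """Run-length encoding of a sorted list: measure the leading run, recurse on the rest."""
--     if not xs:
--         return []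
--     run = 1
--     while run < len(xs) and xs[run] == xs[0]:
--         run += 1
--     return [(xs[0], run)] + runs(xs[run:])
--
-- def solution(research, n, k):
--     temp = []
--     for s in research:
--         for c, cnt in runs(sorted(s)):
--             if cnt >= k:
--                 temp.append(c)
--     best_char, best_cnt = None, 0
--     for c, cnt in runs(sorted(temp)):
--         if best_cnt < cnt:
--             best_char, best_cnt = c, cnt
--     if best_cnt < n:
--         raise ValueError("no qualifying key")
--     return best_char
-- ===== Notes on version B (the rewrite author's own statement) =====
-- stated objective: alternative
-- what changed: B uses no Counter/dict at all: it sorts each string and run-length-encodes it to find the per-string qualifying characters, then sorts the collected list once and run-length-encodes it again, picking the best key in a single strictly-improving scan instead of most_common() plus filter plus sort-and-index.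
import Mathlib
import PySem

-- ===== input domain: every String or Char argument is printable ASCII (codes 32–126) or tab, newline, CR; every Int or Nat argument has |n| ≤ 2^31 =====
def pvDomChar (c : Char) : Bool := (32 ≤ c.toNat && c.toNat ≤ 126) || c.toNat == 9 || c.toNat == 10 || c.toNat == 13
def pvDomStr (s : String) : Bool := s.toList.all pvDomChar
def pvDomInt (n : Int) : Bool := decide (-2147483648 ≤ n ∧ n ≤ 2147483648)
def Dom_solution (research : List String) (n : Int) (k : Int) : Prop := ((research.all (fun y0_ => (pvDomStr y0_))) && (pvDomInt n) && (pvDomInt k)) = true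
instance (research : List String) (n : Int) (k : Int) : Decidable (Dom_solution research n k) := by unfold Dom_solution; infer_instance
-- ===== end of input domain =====

-- B uses no Counter/dict at all: it sorts and run-length-encodes each string to find the
-- qualifying characters, then sorts and run-length-encodes the collected list and picks the
-- best key in one strictly-improving scan (objective: alternative algorithm, similar cost).

-- ===== PORT A =====
def solution (research : List String) (n : Int) (k : Int) : String :=
  let temp : List Char :=
    research.foldl (fun temp re =>
      (PySem.Dict.counter re.toList).items.foldl
        (fun temp kv => if k ≤ kv.2 then temp ++ [kv.1] else temp) temp) []
  let arr := PySem.List.sorted (PySem.Dict.counter temp).items (fun kv => kv.2) true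
  let answer :=
    PySem.List.sorted
      ((arr.filter (fun kv => decide (n ≤ kv.2) && (kv.2 == (arr.headD (' ', 0)).2))).map
        (fun kv => String.ofList [kv.1])) (fun s => s) false
  (PySem.List.pyGet? answer 0).getD ""   -- answer[0]; none (IndexError) is excluded by Pre_

-- ===== PORT B =====
-- B's helper runs(xs): measure the leading run (the while loop = takeWhile), recurse on the rest
def rle : List Char → List (Char × Int)
  | [] => []
  | c :: rest =>
    (c, 1 + ((rest.takeWhile (fun d => d == c)).length : Int)) ::
      rle (rest.dropWhile (fun d => d == c))
  termination_by xs => xs.length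
  decreasing_by
    simp only [List.length_cons]
    exact Nat.lt_succ_of_le (List.length_dropWhile_le _ _)

def solution_alt (research : List String) (n : Int) (k : Int) : String :=
  let temp : List Char :=
    research.foldl (fun temp s =>
      (rle (PySem.List.sorted s.toList (fun c => c) false)).foldl
        (fun temp kv => if k ≤ kv.2 then temp ++ [kv.1] else temp) temp) []
  let best :=
    (rle (PySem.List.sorted temp (fun c => c) false)).foldl
      (fun b kv => if b.2 < kv.2 then (some kv.1, kv.2) else b) ((none : Option Char), (0 : Int))
  if best.2 < n then ""   -- Python raises ValueError here; excluded by Pre_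
  else
    match best.1 with
    | some c => String.ofList [c]
    | none => ""   -- best_char is still None: only reachable outside Pre_

-- ===== PRECONDITION & SPEC =====
-- number of research strings in which character c occurs at least k times
def pvCnt (research : List String) (k : Int) (c : Char) : Int :=
  (research.countP (fun s => decide (c ∈ s.toList) && decide (k ≤ (s.toList.count c : Int))) : Int)

-- Pre_ excludes exactly the inputs on which A raises (IndexError on answer[0] / arr[0]):
-- it requires some character to qualify in at least one and at least n research strings while having the maximal such count.
def Pre_solution (research : List String) (n : Int) (k : Int) : Prop :=
  (research.flatMap (fun s => s.toList)).any (fun c =>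
    decide (1 ≤ pvCnt research k c) && decide (n ≤ pvCnt research k c) &&
      (research.flatMap (fun s => s.toList)).all
        (fun c' => decide (pvCnt research k c' ≤ pvCnt research k c))) = true
instance (research : List String) (n : Int) (k : Int) : Decidable (Pre_solution research n k) := by
  unfold Pre_solution; infer_instance

def pvWitness_solution : List String × Int × Int := (["aab", "aab"], 2, 2)

def Spec_solution (research : List String) (n : Int) (k : Int) (out : String) : Prop := out = solution_alt research n k
instance (research : List String) (n : Int) (k : Int) (out : String) : Decidable (Spec_solution research n k out) := by unfold Spec_solution; infer_instance

-- ===== CLAIM (what is proved, stated in full; the proofs are below) =====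
def Claim_equal_solution : Prop := ∀ (research : List String) (n : Int) (k : Int), Dom_solution research n k → Pre_solution research n k → Spec_solution research n k (solution research n k)

-- ===== LEMMAS AND PROOFS =====

-- the qualifying keys, string by string, in A's temp order
def pvTemp (research : List String) (k : Int) : List Char :=
  research.flatMap (fun s => (PySem.Set.ofList s.toList).filter (fun c => decide (k ≤ (s.toList.count c : Int))))

-- A's items list: distinct qualifying keys with their cross-string counts
def pvItemsA (research : List String) (k : Int) : List (Char × Int) :=
  (PySem.Set.ofList (pvTemp research k)).map (fun c => (c, ((pvTemp research k).count c : Int)))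

lemma pvTempA (research : List String) (k : Int) :
    research.foldl (fun temp re =>
      (PySem.Dict.counter re.toList).items.foldl
        (fun temp kv => if k ≤ kv.2 then temp ++ [kv.1] else temp) temp) [] = pvTemp research k := by
  have h1 : ∀ (re : String) (acc : List Char),
      (PySem.Dict.counter re.toList).items.foldl
        (fun temp kv => if k ≤ kv.2 then temp ++ [kv.1] else temp) acc
      = acc ++ (PySem.Set.ofList re.toList).filter (fun c => decide (k ≤ (re.toList.count c : Int))) := by
    intro re acc
    have hfn : (fun (temp : List Char) (kv : Char × Int) => if k ≤ kv.2 then temp ++ [kv.1] else temp)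
        = fun temp kv => if (decide (k ≤ kv.2)) = true then temp ++ [kv.1] else temp := by
      funext t kv; simp
    rw [hfn, PySem.List.foldl_append_if, PySem.Dict.items_counter, List.filter_map, List.map_map]
    simp [Function.comp_def]
  simp only [h1]
  rw [PySem.List.foldl_append_eq_flatMap]
  simp [pvTemp]

lemma pvCount_temp (research : List String) (k : Int) (c : Char) :
    ((pvTemp research k).count c : Int) = pvCnt research k c := by
  unfold pvTemp pvCnt
  induction research with
  | nil => simp
  | cons s rest ih =>
    have hnd : ((PySem.Set.ofList s.toList).filter
        (fun c => decide (k ≤ (s.toList.count c : Int)))).Nodup :=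
      (PySem.Set.nodup_ofList s.toList).filter _
    have hcnt := hnd.count (a := c)
    simp only [List.flatMap_cons, List.count_append, List.countP_cons, hcnt]
    by_cases hin : c ∈ (PySem.Set.ofList s.toList).filter (fun c => decide (k ≤ (s.toList.count c : Int)))
    · have h2 := List.mem_filter.1 hin
      have hmem : c ∈ s.toList := (PySem.Set.mem_ofList s.toList c).1 h2.1
      have hk : k ≤ (s.toList.count c : Int) := by simpa using h2.2
      simp only [hin, hmem, hk, decide_true, Bool.and_self, if_pos]
      push_cast
      omega
    · have hnot : ¬ (c ∈ s.toList ∧ k ≤ (s.toList.count c : Int)) := by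
        rintro ⟨hm, hk⟩
        exact hin (List.mem_filter.2 ⟨(PySem.Set.mem_ofList s.toList c).2 hm, by simpa using hk⟩)
      have hcond : (decide (c ∈ s.toList) && decide (k ≤ (s.toList.count c : Int))) = false := by
        by_cases hmem : c ∈ s.toList
        · have hk : ¬ k ≤ (s.toList.count c : Int) := fun hk => hnot ⟨hmem, hk⟩
          simp [hk]
        · simp [hmem]
      simp only [hin, if_false, hcond]
      push_cast
      omega

lemma pvMemTemp_sub (research : List String) (k : Int) (c : Char) (h : c ∈ pvTemp research k) :
    c ∈ research.flatMap (fun s => s.toList) := by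
  unfold pvTemp at h
  obtain ⟨s, hs, hc⟩ := List.mem_flatMap.1 h
  exact List.mem_flatMap.2 ⟨s, hs, (PySem.Set.mem_ofList s.toList c).1 (List.mem_of_mem_filter hc)⟩

-- ===== B-side structure lemmas =====

-- run-length encoding of a sorted list: strictly increasing keys, same members, exact counts
lemma rle_spec : ∀ (xs : List Char), xs.Pairwise (· ≤ ·) →
    ((rle xs).map Prod.fst).Pairwise (· < ·) ∧
    (∀ c, c ∈ (rle xs).map Prod.fst ↔ c ∈ xs) ∧
    (∀ p ∈ rle xs, p.2 = (xs.count p.1 : Int)) := by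
  intro xs
  induction xs using rle.induct with
  | case1 => intro _; simp [rle]
  | case2 c rest ih =>
    intro h
    rw [List.pairwise_cons] at h
    obtain ⟨hpc, hrestPW⟩ := h
    set run := rest.takeWhile (fun d => d == c) with hrunDef
    set drop := rest.dropWhile (fun d => d == c) with hdropDef
    have hrun : ∀ d ∈ run, d = c := by
      intro d hd
      have := List.mem_takeWhile_imp hd
      simpa using this
    have hsplit : run ++ drop = rest := List.takeWhile_append_dropWhile
    have hdropSub : drop.Sublist rest := List.dropWhile_sublist _
    have hdropPW : drop.Pairwise (· ≤ ·) := hrestPW.sublist hdropSub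
    have hcd : ∀ d ∈ drop, c < d := by
      intro d hd
      rcases hdw : drop with _ | ⟨d₀, t⟩
      · rw [hdw] at hd; simp at hd
      · have hne : (d₀ == c) = false := by
          have := List.head_dropWhile_not (fun d => d == c) (l := rest)
            (by rw [← hdropDef, hdw]; simp)
          simpa [← hdropDef, hdw] using this
        have hd₀ : c < d₀ := by
          have hmem : d₀ ∈ rest := hdropSub.subset (by rw [hdw]; exact List.mem_cons_self)
          have := hpc d₀ hmem
          rcases lt_or_eq_of_le this with h | h
          · exact h
          · exact absurd h.symm (by simpa using hne)
        rw [hdw] at hd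
        rcases List.mem_cons.1 hd with rfl | hd
        · exact hd₀
        · exact lt_of_lt_of_le hd₀ (List.rel_of_pairwise_cons (hdw ▸ hdropPW) hd)
    have hcnot : c ∉ drop := fun hc => lt_irrefl c (hcd c hc)
    have ihs := ih hdropPW
    have hcount_c : ((c :: rest).count c : Int) = 1 + (run.length : Int) := by
      rw [← hsplit]
      simp only [List.count_cons_self, List.count_append]
      rw [List.count_eq_length.2 (fun b hb => (hrun b hb).symm), List.count_eq_zero.2 hcnot]
      push_cast; ring
    refine ⟨?_, ?_, ?_⟩
    · rw [rle]
      simp only [List.map_cons, List.pairwise_cons]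
      exact ⟨fun y hy => hcd y ((ihs.2.1 y).1 hy), ihs.1⟩
    · intro c'
      rw [rle]
      simp only [List.map_cons, List.mem_cons]
      rw [ihs.2.1 c']
      constructor
      · rintro (rfl | h)
        · left; rfl
        · right; exact hdropSub.subset h
      · intro hx
        rcases hx with rfl | hx
        · left; rfl
        · rw [← hsplit] at hx
          rcases List.mem_append.1 hx with hx | hx
          · left; exact hrun c' hx
          · right; exact hx
    · intro p hp
      rw [rle] at hp
      rcases List.mem_cons.1 hp with rfl | hp
      · exact hcount_c.symm
      · have hmem : p.1 ∈ drop := (ihs.2.1 p.1).1 (List.mem_map_of_mem hp)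
        have hne : p.1 ≠ c := fun h => hcnot (h ▸ hmem)
        have hnotrun : p.1 ∉ run := fun h => hne (hrun p.1 h)
        have : (c :: rest).count p.1 = drop.count p.1 := by
          rw [← hsplit]
          have hne' : ¬ c = p.1 := fun h => hne h.symm
          simp [List.count_append, hne', List.count_eq_zero.2 hnotrun]
        rw [this]
        exact ihs.2.2 p hp

-- the running best count of B's final scan is a running max
lemma pvScanSnd : ∀ (its : List (Char × Int)) (b : Option Char) (m : Int),
    (its.foldl (fun b kv => if b.2 < kv.2 then (some kv.1, kv.2) else b) (b, m)).2
      = its.foldl (fun a kv => max a kv.2) m := by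
  intro its
  induction its with
  | nil => intros; rfl
  | cons kv t ih =>
    intro b m
    simp only [List.foldl_cons]
    by_cases h : m < kv.2
    · rw [if_pos (by simpa using h), ih, max_eq_right (le_of_lt h)]
    · rw [if_neg (by simpa using h), ih, max_eq_left (le_of_not_gt h)]

lemma pvScanNoImp : ∀ (its : List (Char × Int)) (b : Option Char) (m : Int),
    (∀ p ∈ its, p.2 ≤ m) →
    its.foldl (fun b kv => if b.2 < kv.2 then (some kv.1, kv.2) else b) (b, m) = (b, m) := by
  intro its
  induction its with
  | nil => intros; rfl
  | cons kv t ih =>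
    intro b m h
    simp only [List.foldl_cons]
    rw [if_neg (by simpa using not_lt_of_ge (h kv List.mem_cons_self))]
    exact ih b m (fun p hp => h p (List.mem_cons_of_mem _ hp))

-- B's scan lands on the FIRST element attaining the running max
lemma pvScanFst : ∀ (its : List (Char × Int)) (b : Option Char) (m M : Int),
    M = its.foldl (fun a kv => max a kv.2) m → m < M →
    ∃ p, its.find? (fun kv => decide (M ≤ kv.2)) = some p ∧
      (its.foldl (fun b kv => if b.2 < kv.2 then (some kv.1, kv.2) else b) (b, m)).1 = some p.1 := by
  intro its
  induction its with
  | nil => intro b m M hM hlt; rw [hM] at hlt; exact absurd hlt (lt_irrefl m)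
  | cons q t ih =>
    intro b m M hM hlt
    simp only [List.foldl_cons] at hM ⊢
    by_cases hv : m < q.2
    · rw [max_eq_right (le_of_lt hv)] at hM
      by_cases hMv : M ≤ q.2
      · have hq2 : q.2 ≤ M := hM ▸ (PySem.List.le_foldl_max_int t (fun kv => kv.2) q.2).1
        have hEq : q.2 = M := le_antisymm hq2 hMv
        refine ⟨q, ?_, ?_⟩
        · rw [List.find?_cons_of_pos (h := by simpa using hMv)]
        · rw [if_pos (by simpa using hv)]
          have hub : ∀ p ∈ t, p.2 ≤ q.2 := by
            intro p hp
            have := (PySem.List.le_foldl_max_int t (fun kv => kv.2) q.2).2 p hp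
            rw [← hM] at this
            exact le_trans this (le_of_eq hEq.symm)
          rw [pvScanNoImp t (some q.1) q.2 hub]
      · obtain ⟨p, hfind, hfst⟩ := ih (some q.1) q.2 M hM (lt_of_not_ge hMv)
        refine ⟨p, ?_, ?_⟩
        · rw [List.find?_cons_of_neg (h := by simpa using hMv)]; exact hfind
        · rw [if_pos (by simpa using hv)]; exact hfst
    · rw [max_eq_left (le_of_not_gt hv)] at hM
      have hMq : ¬ M ≤ q.2 := fun h =>
        absurd hlt (not_lt_of_ge (le_trans h (le_of_not_gt hv)))
      obtain ⟨p, hfind, hfst⟩ := ih b m M hM hlt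
      refine ⟨p, ?_, ?_⟩
      · rw [List.find?_cons_of_neg (h := by simpa using hMq)]; exact hfind
      · rw [if_neg (by simpa using hv)]; exact hfst

lemma pvFoldlMaxLe : ∀ (its : List (Char × Int)) (m M : Int),
    m ≤ M → (∀ p ∈ its, p.2 ≤ M) → its.foldl (fun a kv => max a kv.2) m ≤ M := by
  intro its
  induction its with
  | nil => intro m M h _; exact h
  | cons q t ih =>
    intro m M h hub
    simp only [List.foldl_cons]
    exact ih _ M (max_le h (hub q List.mem_cons_self)) (fun p hp => hub p (List.mem_cons_of_mem _ hp))

lemma pvStrMono (a b : Char) (h : a ≤ b) : String.ofList [a] ≤ String.ofList [b] := by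
  rcases lt_or_eq_of_le h with h | h
  · refine le_of_lt ?_
    rw [String.lt_iff_toList_lt]
    simp only [String.toList_ofList]
    exact List.Lex.rel h
  · simp [h]

lemma pvPermFlatMap {α β : Type} (l : List α) (f g : α → List β)
    (h : ∀ s ∈ l, (f s).Perm (g s)) : (l.flatMap f).Perm (l.flatMap g) := by
  induction l with
  | nil => simp
  | cons s t ih =>
    simp only [List.flatMap_cons]
    exact (h s List.mem_cons_self).append (ih (fun x hx => h x (List.mem_cons_of_mem _ hx)))

-- B's temp-building foldl, as a flatMap
def pvTempB (research : List String) (k : Int) : List Char :=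
  research.flatMap (fun s =>
    ((rle (PySem.List.sorted s.toList (fun c => c) false)).filter
      (fun kv => decide (k ≤ kv.2))).map (fun kv => kv.1))

lemma pvTempB_eq (research : List String) (k : Int) :
    research.foldl (fun temp s =>
      (rle (PySem.List.sorted s.toList (fun c => c) false)).foldl
        (fun temp kv => if k ≤ kv.2 then temp ++ [kv.1] else temp) temp) [] = pvTempB research k := by
  have h1 : ∀ (s : String) (acc : List Char),
      (rle (PySem.List.sorted s.toList (fun c => c) false)).foldl
        (fun temp kv => if k ≤ kv.2 then temp ++ [kv.1] else temp) acc
      = acc ++ ((rle (PySem.List.sorted s.toList (fun c => c) false)).filter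
          (fun kv => decide (k ≤ kv.2))).map (fun kv => kv.1) := by
    intro s acc
    have hfn : (fun (temp : List Char) (kv : Char × Int) => if k ≤ kv.2 then temp ++ [kv.1] else temp)
        = fun temp kv => if (decide (k ≤ kv.2)) = true then temp ++ [kv.1] else temp := by
      funext t kv; simp
    rw [hfn, PySem.List.foldl_append_if]
  simp only [h1]
  rw [PySem.List.foldl_append_eq_flatMap]
  rfl

lemma pvSortedPW (xs : List Char) : (PySem.List.sorted xs (fun c => c) false).Pairwise (· ≤ ·) := by
  have := PySem.List.sorted_pairwise xs (fun c => c)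
  simpa using this

lemma pvKeysNodup (xs : List (Char × Int)) (h : (xs.map Prod.fst).Pairwise (· < ·)) :
    (xs.map Prod.fst).Nodup :=
  h.imp ne_of_lt

lemma pvTempB_perm (research : List String) (k : Int) :
    (pvTempB research k).Perm (pvTemp research k) := by
  unfold pvTempB pvTemp
  apply pvPermFlatMap
  intro s _
  set ss := PySem.List.sorted s.toList (fun c => c) false with hss
  have hsp := rle_spec ss (pvSortedPW s.toList)
  have hcnt : ∀ p ∈ rle ss, p.2 = ((s.toList.count p.1 : Nat) : Int) := by
    intro p hp
    rw [hsp.2.2 p hp]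
    congr 1
    exact (PySem.List.sorted_perm s.toList (fun c => c) false).count_eq p.1
  have hfc : (rle ss).filter (fun kv => decide (k ≤ kv.2))
      = (rle ss).filter (fun kv => decide (k ≤ ((s.toList.count kv.1 : Nat) : Int))) := by
    apply List.filter_congr
    intro kv hkv
    rw [hcnt kv hkv]
  rw [hfc]
  have hmapfil : ((rle ss).filter
        (fun kv => decide (k ≤ ((s.toList.count kv.1 : Nat) : Int)))).map (fun kv => kv.1)
      = ((rle ss).map Prod.fst).filter (fun c => decide (k ≤ ((s.toList.count c : Nat) : Int))) := by
    rw [List.filter_map]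
    rfl
  rw [hmapfil]
  apply List.Perm.filter
  rw [List.perm_ext_iff_of_nodup (pvKeysNodup _ hsp.1) (PySem.Set.nodup_ofList _)]
  intro c
  rw [hsp.2.1 c, PySem.Set.mem_ofList]
  exact PySem.List.mem_sorted s.toList (fun c => c) false c

-- the common core: A's sort-filter-sort-index and B's strictly-improving scan pick the same string
lemma pvMain (items : List (Char × Int)) (n : Int) (M : Int) (c₀ : Char)
    (hc₀ : (c₀, M) ∈ items)
    (hub : ∀ kv ∈ items, kv.2 ≤ M)
    (hn : n ≤ M) :
    (PySem.List.pyGet? (PySem.List.sorted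
        (((PySem.List.sorted items (fun kv => kv.2) true).filter
            (fun kv => decide (n ≤ kv.2) &&
              (kv.2 == ((PySem.List.sorted items (fun kv => kv.2) true).headD (' ', 0)).2))).map
          (fun kv => String.ofList [kv.1])) (fun s => s) false) 0).getD ""
    = (PySem.List.min? ((items.filter (fun kv => decide (n ≤ kv.2) && (kv.2 == M))).map
        (fun kv => String.ofList [kv.1])) (fun s => s)).getD "" := by
  have hne : items ≠ [] := List.ne_nil_of_mem hc₀
  rcases harr : PySem.List.sorted items (fun kv => kv.2) true with - | ⟨a0, tarr⟩
  · exact absurd ((PySem.List.sorted_eq_nil_iff _ _ _).1 harr) hne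
  have ha0mem : a0 ∈ items :=
    (PySem.List.sorted_perm items (fun kv => kv.2) true).subset
      (by rw [harr]; exact List.mem_cons_self)
  have hub0 := PySem.List.key_head_sorted_rev_ge items (fun kv => kv.2) harr
  have ha0 : a0.2 = M := le_antisymm (hub a0 ha0mem) (hub0 (c₀, M) hc₀)
  have hp : (a0 :: tarr).Perm items := harr ▸ PySem.List.sorted_perm items (fun kv => kv.2) true
  have hFA : (((a0 :: tarr).filter (fun kv => decide (n ≤ kv.2) && (kv.2 == a0.2))).map
        (fun kv => String.ofList [kv.1])).Perm
      ((items.filter (fun kv => decide (n ≤ kv.2) && (kv.2 == a0.2))).map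
        (fun kv => String.ofList [kv.1])) :=
    (hp.filter _).map _
  have hc₀f : (c₀, M) ∈ items.filter (fun kv => decide (n ≤ kv.2) && (kv.2 == a0.2)) :=
    List.mem_filter.2 ⟨hc₀, by simp [ha0, hn]⟩
  have hFne : (items.filter (fun kv => decide (n ≤ kv.2) && (kv.2 == a0.2))).map
      (fun kv => String.ofList [kv.1]) ≠ [] :=
    List.ne_nil_of_mem (List.mem_map_of_mem hc₀f)
  have hps : PySem.List.sorted (((a0 :: tarr).filter
        (fun kv => decide (n ≤ kv.2) && (kv.2 == a0.2))).map (fun kv => String.ofList [kv.1]))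
        (fun s => s) false
      = PySem.List.sorted ((items.filter (fun kv => decide (n ≤ kv.2) && (kv.2 == a0.2))).map
        (fun kv => String.ofList [kv.1])) (fun s => s) false :=
    PySem.List.sorted_eq_sorted_of_perm _ _ _ (fun _ _ h => h) hFA
  simp only [List.headD_cons]
  rw [hps, ← ha0]
  rcases hmn : PySem.List.min? ((items.filter
      (fun kv => decide (n ≤ kv.2) && (kv.2 == a0.2))).map (fun kv => String.ofList [kv.1]))
      (fun s => s) with - | mf
  · rw [PySem.List.min?_eq_none_iff] at hmn; exact absurd hmn hFne
  rcases hs : PySem.List.sorted ((items.filter (fun kv => decide (n ≤ kv.2) && (kv.2 == a0.2))).map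
      (fun kv => String.ofList [kv.1])) (fun s => s) false with - | ⟨m0, t0⟩
  · rw [PySem.List.sorted_eq_nil_iff] at hs; exact absurd hs hFne
  have hm0mem : m0 ∈ (items.filter (fun kv => decide (n ≤ kv.2) && (kv.2 == a0.2))).map
      (fun kv => String.ofList [kv.1]) :=
    (PySem.List.sorted_perm _ (fun s : String => s) false).subset
      (by rw [hs]; exact List.mem_cons_self)
  have hlb := PySem.List.key_head_sorted_le _ (fun s : String => s) hs
  have hmf : mf = m0 := le_antisymm (PySem.List.min?_isMin hmn m0 hm0mem)
    (hlb mf (PySem.List.min?_mem hmn))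
  rw [hmn, hs, hmf]
  simp [PySem.List.pyGet?, PySem.List.pyIdx?]

-- B's scan picks the min-key max-count element
lemma pvScanMain (its itemsA : List (Char × Int)) (n M : Int) (c₀ : Char)
    (hperm : its.Perm itemsA)
    (hkeys : (its.map Prod.fst).Pairwise (· < ·))
    (hc₀ : (c₀, M) ∈ its)
    (hub : ∀ p ∈ its, p.2 ≤ M)
    (hpos : 1 ≤ M)
    (hn : n ≤ M) :
    (if ((its.foldl (fun b kv => if b.2 < kv.2 then (some kv.1, kv.2) else b)
          ((none : Option Char), (0 : Int))).2 < n) then ""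
     else
       match (its.foldl (fun b kv => if b.2 < kv.2 then (some kv.1, kv.2) else b)
          ((none : Option Char), (0 : Int))).1 with
       | some c => String.ofList [c]
       | none => "")
    = (PySem.List.min? ((itemsA.filter (fun kv => decide (n ≤ kv.2) && (kv.2 == M))).map
        (fun kv => String.ofList [kv.1])) (fun s => s)).getD "" := by
  have hMfold : M = its.foldl (fun a kv => max a kv.2) 0 := by
    refine le_antisymm ?_ (pvFoldlMaxLe its 0 M (by omega) hub)
    exact (PySem.List.le_foldl_max_int its (fun kv => kv.2) 0).2 (c₀, M) hc₀
  have hsnd := pvScanSnd its none 0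
  rw [← hMfold] at hsnd
  obtain ⟨p, hfind, hfst⟩ := pvScanFst its none 0 M hMfold (by omega)
  have hpmem : p ∈ its := List.mem_of_find?_eq_some hfind
  have hppred : M ≤ p.2 := by simpa using List.find?_some hfind
  have hp2 : p.2 = M := le_antisymm (hub p hpmem) hppred
  have hmin : ∀ q ∈ its, q.2 = M → p.1 ≤ q.1 := by
    intro q hq hqM
    have hiff := List.find?_eq_some_iff_append.1 hfind
    obtain ⟨as, bs, hits, has⟩ := hiff.2
    have hqas : q ∉ as := by
      intro hqin
      have := has q hqin
      simp [hqM] at this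
    rw [hits] at hq
    rcases List.mem_append.1 hq with hq | hq
    · exact absurd hq hqas
    · rcases List.mem_cons.1 hq with rfl | hq
      · exact le_refl _
      · have hk := hkeys
        rw [hits, List.map_append, List.map_cons] at hk
        have h2 := (List.pairwise_append.1 hk).2.1
        rw [List.pairwise_cons] at h2
        exact le_of_lt (h2.1 q.1 (List.mem_map_of_mem hq))
  have hifneg : ¬ ((its.foldl (fun b kv => if b.2 < kv.2 then (some kv.1, kv.2) else b)
      ((none : Option Char), (0 : Int))).2 < n) := by
    rw [hsnd]; omega
  rw [if_neg hifneg, hfst]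
  -- RHS
  have hpF : p ∈ itemsA.filter (fun kv => decide (n ≤ kv.2) && (kv.2 == M)) :=
    List.mem_filter.2 ⟨hperm.subset hpmem, by simp [hp2, hn]⟩
  have hps : String.ofList [p.1] ∈ (itemsA.filter
      (fun kv => decide (n ≤ kv.2) && (kv.2 == M))).map (fun kv => String.ofList [kv.1]) :=
    List.mem_map_of_mem hpF
  rcases hmn : PySem.List.min? ((itemsA.filter
      (fun kv => decide (n ≤ kv.2) && (kv.2 == M))).map (fun kv => String.ofList [kv.1]))
      (fun s => s) with - | mf
  · rw [PySem.List.min?_eq_none_iff] at hmn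
    rw [hmn] at hps
    simp at hps
  · have hmfmem := PySem.List.min?_mem hmn
    obtain ⟨q, hqF, hqmf⟩ := List.mem_map.1 hmfmem
    have hq := List.mem_filter.1 hqF
    have hqits : q ∈ its := hperm.symm.subset hq.1
    have hqM : q.2 = M := by
      have := hq.2
      simp only [Bool.and_eq_true, beq_iff_eq] at this
      exact this.2
    have hle1 : mf ≤ String.ofList [p.1] := PySem.List.min?_isMin hmn _ hps
    have hle2 : String.ofList [p.1] ≤ mf := by
      rw [← hqmf]
      exact pvStrMono _ _ (hmin q hqits hqM)
    rw [hmn, le_antisymm hle1 hle2]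
    rfl

-- ===== VERDICT (by name: the statement is the Claim_ definition above) =====
theorem solution_spec : Claim_equal_solution := by
  intro research n k _hdom hpre
  unfold Spec_solution
  unfold Pre_solution at hpre
  rw [List.any_eq_true] at hpre
  obtain ⟨c₀, _hc₀chars, hf⟩ := hpre
  rw [Bool.and_eq_true, Bool.and_eq_true, decide_eq_true_eq, decide_eq_true_eq,
    List.all_eq_true] at hf
  obtain ⟨⟨h1, hn⟩, hmax'⟩ := hf
  have hmax : ∀ c' ∈ research.flatMap (fun s => s.toList),
      pvCnt research k c' ≤ pvCnt research k c₀ := fun c' hc' => by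
    simpa using hmax' c' hc'
  set M := pvCnt research k c₀ with hM
  -- A side
  have hc₀T : c₀ ∈ pvTemp research k := by
    have h1' : (1 : Int) ≤ ((pvTemp research k).count c₀ : Int) := by
      rw [pvCount_temp]; exact h1
    exact List.count_pos_iff.1 (by exact_mod_cast h1')
  have hitemsA : pvItemsA research k = (PySem.Set.ofList (pvTemp research k)).map
      (fun c => (c, pvCnt research k c)) := by
    unfold pvItemsA
    exact List.map_congr_left (fun c _ => by rw [pvCount_temp])
  have hc₀A : (c₀, M) ∈ pvItemsA research k := by
    rw [hitemsA]
    exact List.mem_map_of_mem ((PySem.Set.mem_ofList _ _).2 hc₀T)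
  have hubA : ∀ kv ∈ pvItemsA research k, kv.2 ≤ M := by
    intro kv hkv
    rw [hitemsA] at hkv
    rcases List.mem_map.1 hkv with ⟨c, hc, rfl⟩
    exact hmax c (pvMemTemp_sub research k c ((PySem.Set.mem_ofList _ _).1 hc))
  -- B side facts
  set its := rle (PySem.List.sorted (pvTempB research k) (fun c => c) false) with hits
  have hsp := rle_spec _ (pvSortedPW (pvTempB research k))
  have hcnt : ∀ p ∈ its, p.2 = pvCnt research k p.1 := by
    intro p hp
    rw [hsp.2.2 p hp]
    rw [(PySem.List.sorted_perm (pvTempB research k) (fun c => c) false).count_eq,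
      (pvTempB_perm research k).count_eq, pvCount_temp]
  have hmemits : ∀ c, c ∈ its.map Prod.fst ↔ c ∈ pvTemp research k := by
    intro c
    rw [hsp.2.1 c, PySem.List.mem_sorted (pvTempB research k) (fun c => c) false c]
    exact (pvTempB_perm research k).mem_iff
  have hpermK : (its.map Prod.fst).Perm (PySem.Set.ofList (pvTemp research k)) := by
    rw [List.perm_ext_iff_of_nodup (pvKeysNodup _ hsp.1) (PySem.Set.nodup_ofList _)]
    intro c
    rw [hmemits c, PySem.Set.mem_ofList]
  have hitsEq : its = (its.map Prod.fst).map (fun c => (c, pvCnt research k c)) := by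
    rw [List.map_map]
    symm
    calc its.map ((fun c => (c, pvCnt research k c)) ∘ Prod.fst)
        = its.map id := List.map_congr_left (fun p hp => by
          obtain ⟨a, v⟩ := p
          have hv : v = pvCnt research k a := hcnt ⟨a, v⟩ hp
          simp [← hv])
      _ = its := List.map_id its
  have hperm : its.Perm (pvItemsA research k) := by
    rw [hitsEq, hitemsA]
    exact hpermK.map _
  have hc₀I : (c₀, M) ∈ its := by
    have hmm : c₀ ∈ its.map Prod.fst := (hmemits c₀).2 hc₀T
    rcases List.mem_map.1 hmm with ⟨p, hp, hp1⟩
    have hv := hcnt p hp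
    have hpe : p = (c₀, M) := by
      obtain ⟨a, v⟩ := p
      simp only at hp1
      subst hp1
      rw [Prod.mk.injEq]
      exact ⟨rfl, by simpa using hv⟩
    exact hpe ▸ hp
  have hubI : ∀ p ∈ its, p.2 ≤ M := by
    intro p hp
    rw [hcnt p hp]
    exact hmax p.1 (pvMemTemp_sub research k p.1 ((hmemits p.1).1 (List.mem_map_of_mem hp)))
  -- assemble
  simp only [solution, solution_alt]
  rw [pvTempA, pvTempB_eq]
  simp only [PySem.Dict.items_counter, ← hits]
  refine (pvMain _ n M c₀ ?_ ?_ hn).trans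
    (pvScanMain its _ n M c₀ ?_ hsp.1 hc₀I hubI h1 hn).symm
  · exact hc₀A
  · exact hubA
  · exact hperm
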